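-- pv_equiv track=rewrite | github.com/marcoamolinaro/avaliacao_vivo | Q1/questao1.py | contar_elementos
-- ===== SOURCE A (Python) =====
-- def contar_elementos(lista):
--     matriz = [
--         [5, 8, 3, 2, 1],
--         [9, 7, 11, 0, 6],
--         [4, 10, 13, 15, 12],
--         [14, 3, 5, 8, 9],
--         [1, 2, 6, 7, 4]
--     ]
--
--     contagem = {}
--     for elemento in lista:
--         if 0 <= elemento <= 15:
--             contagem[elemento] = 0
--
--     for linha in matriz:
--         for valor in linha:
--             if valor in contagem:
--                 contagem[valor] += 1
--
--     resultado = ""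
--     for elemento, quantidade in contagem.items():
--         resultado += f"O elemento {elemento} foi encontroado: {quantidade} veze(s)\n "
--
--     return resultado[:-2]  # Remove a última vírgula e espaço
-- ===== SOURCE B (Python) =====
-- def contar_elementos(lista):
--     matriz = [
--         [5, 8, 3, 2, 1],
--         [9, 7, 11, 0, 6],
--         [4, 10, 13, 15, 12],
--         [14, 3, 5, 8, 9],
--         [1, 2, 6, 7, 4]
--     ]
--
--     linhas = []
--     vistos = []
--     for e in lista:
--         if 0 <= e <= 15 and e not in vistos:
--             vistos.append(e)
--             linhas.append(
--                 f"O elemento {e} foi encontroado: {sum(linha.count(e) for linha in matriz)} veze(s)"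
--             )
--     return "\n ".join(linhas)
-- ===== Notes on version B (the rewrite author's own statement) =====
-- stated objective: alternative
-- what changed: B keeps no tally dict at all: a single pass over lista dedups with a vistos list and, for each new in-range element, counts its matrix occurrences on demand with linha.count and formats the line immediately, joining with '\n ' -- instead of A's three staged passes (seed a dict from lista, scan the matrix incrementing, then iterate the dict and trim with [:-2]).
import Mathlib
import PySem

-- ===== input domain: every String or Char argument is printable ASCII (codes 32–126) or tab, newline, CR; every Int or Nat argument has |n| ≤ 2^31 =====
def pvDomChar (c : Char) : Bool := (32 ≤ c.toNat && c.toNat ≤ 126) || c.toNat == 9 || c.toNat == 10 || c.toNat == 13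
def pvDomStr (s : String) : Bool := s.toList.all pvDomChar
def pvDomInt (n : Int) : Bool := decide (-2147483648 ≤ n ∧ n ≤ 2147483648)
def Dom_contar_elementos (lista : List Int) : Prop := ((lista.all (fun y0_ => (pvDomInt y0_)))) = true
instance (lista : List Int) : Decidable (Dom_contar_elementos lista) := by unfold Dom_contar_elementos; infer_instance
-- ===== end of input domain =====

-- B keeps no tally dict: one pass over lista dedups with a vistos list and counts
-- each new in-range element's matrix occurrences on demand (linha.count), joining
-- with "\n ", instead of A's seeded dict, matrix-scan increments and [:-2] trim.

-- the constant matrix shared by both sources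
def ceMatriz : List (List Int) :=
  [[5, 8, 3, 2, 1],
   [9, 7, 11, 0, 6],
   [4, 10, 13, 15, 12],
   [14, 3, 5, 8, 9],
   [1, 2, 6, 7, 4]]

-- ===== PORT A =====
def contar_elementos (lista : List Int) : String :=
  let contagem : PySem.Dict Int Int :=
    lista.foldl (fun d elemento =>
      if 0 ≤ elemento ∧ elemento ≤ 15 then d.insert elemento 0 else d) PySem.Dict.empty
  let contagem :=
    ceMatriz.foldl (fun d linha =>
      linha.foldl (fun d valor =>
        if d.contains valor then d.modify valor 0 (fun x => x + 1) else d) d) contagem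
  let resultado :=
    contagem.items.foldl (fun r p =>
      r ++ ("O elemento " ++ PySem.Int.toStr p.1 ++ " foi encontroado: " ++
            PySem.Int.toStr p.2 ++ " veze(s)\n ")) ""
  PySem.Str.slice resultado none (some (-2))

-- ===== PORT B =====
-- conta(e) = sum(linha.count(e) for linha in matriz)
def ceConta (e : Int) : Int :=
  (ceMatriz.map (fun linha => (linha.count e : Int))).sum

def contar_elementos_alt (lista : List Int) : String :=
  let acc :=
    lista.foldl (fun (acc : List Int × List String) e =>
      if (0 ≤ e ∧ e ≤ 15) ∧ e ∉ acc.1 then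
        (acc.1 ++ [e],
         acc.2 ++ ["O elemento " ++ PySem.Int.toStr e ++ " foi encontroado: " ++
                   PySem.Int.toStr (ceConta e) ++ " veze(s)"])
      else acc) ([], [])
  PySem.Str.join "\n " acc.2

-- ===== PRECONDITION & SPEC =====
def Spec_contar_elementos (lista : List Int) (out : String) : Prop := out = contar_elementos_alt lista
instance (lista : List Int) (out : String) : Decidable (Spec_contar_elementos lista out) := by unfold Spec_contar_elementos; infer_instance

-- ===== CLAIM (what is proved, stated in full; the proofs are below) =====
def Claim_equal_contar_elementos : Prop := ∀ (lista : List Int), Dom_contar_elementos lista → Spec_contar_elementos lista (contar_elementos lista)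

-- ===== LEMMAS AND PROOFS =====

-- proof-only helper: the elements ceGera emits
def ceKeys : List Int → List Int → List Int
  | [], _ => []
  | e :: cauda, vistos =>
    if (0 ≤ e ∧ e ≤ 15) ∧ e ∉ vistos then e :: ceKeys cauda (vistos ++ [e])
    else ceKeys cauda vistos

theorem ceFold_eq_map (l vistos : List Int) (linhas : List String) :
    (l.foldl (fun (acc : List Int × List String) e =>
      if (0 ≤ e ∧ e ≤ 15) ∧ e ∉ acc.1 then
        (acc.1 ++ [e],
         acc.2 ++ ["O elemento " ++ PySem.Int.toStr e ++ " foi encontroado: " ++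
                   PySem.Int.toStr (ceConta e) ++ " veze(s)"])
      else acc) (vistos, linhas)).2
    = linhas ++ (ceKeys l vistos).map (fun e =>
        "O elemento " ++ PySem.Int.toStr e ++ " foi encontroado: " ++
        PySem.Int.toStr (ceConta e) ++ " veze(s)") := by
  induction l generalizing vistos linhas with
  | nil => simp [ceKeys]
  | cons e t ih =>
      simp only [List.foldl_cons, ceKeys]
      split <;> simp [ih]

-- Set.update by the in-range filter appends exactly ceKeys
theorem ce_update_eq_append (l s : List Int) :
    PySem.Set.update s (l.filter (fun e => decide (0 ≤ e ∧ e ≤ 15))) = s ++ ceKeys l s := by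
  induction l generalizing s with
  | nil => simp [PySem.Set.update_nil, ceKeys]
  | cons e t ih =>
      simp only [List.filter_cons, ceKeys]
      by_cases hP : 0 ≤ e ∧ e ≤ 15
      · by_cases hm : e ∈ s
        · have hadd : PySem.Set.add s e = s := PySem.Set.add_of_mem hm
          rw [if_pos (by simpa using hP), PySem.Set.update_cons, hadd,
              if_neg (by simp [hm]), ih]
        · have hadd : PySem.Set.add s e = s ++ [e] := by
            simp [PySem.Set.add, PySem.Set.contains, hm]
          rw [if_pos (by simpa using hP), PySem.Set.update_cons, hadd,
              if_pos ⟨hP, hm⟩, ih]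
          simp
      · rw [if_neg (by simpa using hP), if_neg (by simp [hP]), ih]

-- phase-1 values are all 0
theorem ce_getD_fold_insert_zero (l : List Int) (d : PySem.Dict Int Int) (k : Int)
    (h : d.getD k 0 = 0) :
    (l.foldl (fun d e => d.insert e (0 : Int)) d).getD k 0 = 0 := by
  induction l generalizing d with
  | nil => simpa using h
  | cons e t ih =>
      simp only [List.foldl_cons]
      exact ih _ (by rw [PySem.Dict.getD_insert]; split <;> simp [h])

-- phase 2 with the contains test is the fold of pure modify over the filtered list
theorem ce_phase2_eq (l : List Int) (d : PySem.Dict Int Int) :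
    l.foldl (fun d v => if d.contains v then d.modify v 0 (fun x => x + 1) else d) d
      = (l.filter (fun v => d.contains v)).foldl (fun d v => d.modify v 0 (fun x => x + 1)) d := by
  induction l generalizing d with
  | nil => rfl
  | cons v t ih =>
      simp only [List.foldl_cons, List.filter_cons]
      by_cases h : d.contains v
      · have hfilter : List.filter (fun x => (d.modify v 0 (fun x => x + 1)).contains x) t
            = List.filter (fun x => d.contains x) t := by
          apply List.filter_congr
          intro x _
          rw [PySem.Dict.contains_modify]
          cases hx : d.contains x with
          | true => simp
          | false =>
              simp only [Bool.or_false]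
              cases hbe : (x == v) with
              | false => rfl
              | true => exact absurd h (by simp at hbe; subst hbe; simp [hx])
        simp only [h, if_true]
        rw [ih, hfilter, List.foldl_cons]
      · simp [h, ih]

-- Set.update by elements already present is the identity
theorem ce_update_of_subset (xs : List Int) (s : PySem.Set Int)
    (h : ∀ x ∈ xs, x ∈ s) :
    PySem.Set.update s xs = s := by
  induction xs generalizing s with
  | nil => simp [PySem.Set.update_nil]
  | cons x t ih =>
      rw [PySem.Set.update_cons, PySem.Set.add_of_mem (h x (by simp))]
      exact ih s (fun y hy => h y (by simp [hy]))

-- string side: the accumulating fold, at the char level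
theorem ce_toList_fold {α : Type} (l : List α) (g : α → String) (r0 : String) :
    (l.foldl (fun r x => r ++ (g x ++ "\n ")) r0).toList
      = r0.toList ++ (l.map (fun x => (g x).toList ++ ['\n', ' '])).flatten := by
  induction l generalizing r0 with
  | nil => simp
  | cons x t ih =>
      simp only [List.foldl_cons, List.map_cons, List.flatten_cons, ih]
      simp [String.toList_append]

theorem ce_flatten_eq_join (c : List Char) (cs : List (List Char)) :
    ((c :: cs).map (fun x => x ++ ['\n', ' '])).flatten
      = PySem.Chars.join ['\n', ' '] (c :: cs) ++ ['\n', ' '] := by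
  induction cs generalizing c with
  | nil => simp [PySem.Chars.join_singleton]
  | cons c' t ih =>
      rw [PySem.Chars.join_cons_cons]
      simp only [List.map_cons, List.flatten_cons] at ih ⊢
      rw [ih c']
      simp

theorem ce_char (cs : List (List Char)) :
    List.take ((cs.map (fun c => c ++ ['\n', ' '])).flatten.length - 2)
        (cs.map (fun c => c ++ ['\n', ' '])).flatten
      = PySem.Chars.join ['\n', ' '] cs := by
  cases cs with
  | nil => simp [PySem.Chars.join_nil]
  | cons c t =>
      rw [ce_flatten_eq_join]
      have hlen : (PySem.Chars.join ['\n', ' '] (c :: t) ++ ['\n', ' ']).length - 2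
          = (PySem.Chars.join ['\n', ' '] (c :: t)).length := by simp
      rw [hlen, List.take_left]

-- the main string lemma: fold-with-trailing-sep then [:-2]  =  join "\n "
theorem ce_slice_fold_eq_join {α : Type} (l : List α) (g : α → String) :
    PySem.Str.slice (l.foldl (fun r x => r ++ (g x ++ "\n ")) "") none (some (-2))
      = PySem.Str.join "\n " (l.map g) := by
  apply String.toList_inj.mp
  rw [PySem.Str.toList_slice, PySem.Str.toList_join]
  show PySem.List.slice _ none (some (-2)) = _
  rw [PySem.List.slice_to_neg_ofNat _ 2 (by omega), ce_toList_fold]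
  have h1 : List.map (fun x => (g x).toList ++ ['\n', ' ']) l
      = (List.map (fun x => (g x).toList) l).map (fun c => c ++ ['\n', ' ']) := by
    rw [List.map_map]; rfl
  have h2 : List.map String.toList (List.map g l) = List.map (fun x => (g x).toList) l := by
    rw [List.map_map]; rfl
  rw [show (("" : String).toList) = ([] : List Char) from rfl, List.nil_append, h1, h2,
      show ("\n " : String).toList = ['\n', ' '] from by decide]
  exact ce_char _

-- per-element counting equals the flattened-matrix count
theorem ce_conta_eq_count (e : Int) : ceConta e = (ceMatriz.flatten.count e : Int) := by
  unfold ceConta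
  rw [List.count_flatten]
  push_cast
  rfl

theorem ce_main (lista : List Int) : contar_elementos lista = contar_elementos_alt lista := by
  have hflat : ∀ (step : PySem.Dict Int Int → Int → PySem.Dict Int Int) (d : PySem.Dict Int Int),
      ceMatriz.foldl (fun d linha => linha.foldl step d) d = ceMatriz.flatten.foldl step d :=
    fun step d => (List.foldl_flatten).symm
  set flat := ceMatriz.flatten with hflatdef
  set K := ceKeys lista [] with hKdef
  have hK : PySem.Set.ofList (lista.filter (fun e => decide (0 ≤ e ∧ e ≤ 15))) = K := by
    have := ce_update_eq_append lista []
    simpa [PySem.Set.ofList] using this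
  set d1 := lista.foldl (fun d elemento =>
      if 0 ≤ elemento ∧ elemento ≤ 15 then d.insert elemento (0 : Int) else d) PySem.Dict.empty with hd1
  have h_d1 : d1 = (lista.filter (fun e => decide (0 ≤ e ∧ e ≤ 15))).foldl
      (fun d e => d.insert e (0 : Int)) PySem.Dict.empty := by
    rw [hd1, List.foldl_filter]; simp only [decide_eq_true_eq]
  have hkeys1 : d1.keys = K := by
    rw [h_d1, PySem.Dict.keys_foldl_insert _ (fun _ _ => (0 : Int)), PySem.Dict.keys_empty,
        PySem.Set.update_nil_left, hK]
  have hval1 : ∀ k : Int, d1.getD k 0 = 0 := fun k => by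
    rw [h_d1]; exact ce_getD_fold_insert_zero _ _ _ (by simp [PySem.Dict.getD_empty])
  set d2 := ceMatriz.foldl (fun d linha =>
      linha.foldl (fun d valor =>
        if d.contains valor then d.modify valor 0 (fun x => x + 1) else d) d) d1 with hd2
  have h_d2 : d2 = (flat.filter (fun v => d1.contains v)).foldl
      (fun d v => d.modify v 0 (fun x => x + 1)) d1 := by
    rw [hd2, hflat, ce_phase2_eq]
  have hkeys2 : d2.keys = K := by
    rw [h_d2, PySem.Dict.keys_foldl_modify _ 0 (fun _ _ => (fun x => x + 1)), hkeys1]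
    apply ce_update_of_subset
    intro x hx
    have := List.of_mem_filter hx
    rw [← hkeys1]
    exact (PySem.Dict.contains_iff_mem_keys d1 x).mp this
  have hval2 : ∀ k ∈ K, d2.getD k 0 = (flat.count k : Int) := by
    intro k hk
    have hc : d1.contains k = true := by
      rw [PySem.Dict.contains_iff_mem_keys, hkeys1]; exact hk
    rw [h_d2, PySem.Dict.getD_foldl_modify_add_one, hval1, List.count_filter hc]
    simp
  have hnodup : d2.keys.Nodup := by
    rw [hkeys2, ← hK]
    exact PySem.Set.nodup_ofList _
  have hitems : d2.items = K.map (fun k => (k, (flat.count k : Int))) := by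
    rw [PySem.Dict.items_eq_map_keys d2 hnodup 0, hkeys2]
    exact List.map_congr_left (fun k hk => by rw [hval2 k hk])
  show PySem.Str.slice (d2.items.foldl (fun r p =>
      r ++ ("O elemento " ++ PySem.Int.toStr p.1 ++ " foi encontroado: " ++
            PySem.Int.toStr p.2 ++ " veze(s)\n ")) "") none (some (-2))
    = PySem.Str.join "\n " (lista.foldl (fun (acc : List Int × List String) e =>
      if (0 ≤ e ∧ e ≤ 15) ∧ e ∉ acc.1 then
        (acc.1 ++ [e],
         acc.2 ++ ["O elemento " ++ PySem.Int.toStr e ++ " foi encontroado: " ++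
                   PySem.Int.toStr (ceConta e) ++ " veze(s)"])
      else acc) ([], [])).2
  have hfun : (fun (r : String) (p : Int × Int) =>
      r ++ ("O elemento " ++ PySem.Int.toStr p.1 ++ " foi encontroado: " ++
            PySem.Int.toStr p.2 ++ " veze(s)\n "))
    = (fun (r : String) (p : Int × Int) =>
      r ++ (("O elemento " ++ PySem.Int.toStr p.1 ++ " foi encontroado: " ++
            PySem.Int.toStr p.2 ++ " veze(s)") ++ "\n ")) := by
    funext r p
    rw [show (" veze(s)\n " : String) = " veze(s)" ++ "\n " from by decide]
    simp [String.append_assoc]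
  rw [hfun, ce_slice_fold_eq_join, hitems, List.map_map, ceFold_eq_map, List.nil_append, ← hKdef]
  exact congrArg (PySem.Str.join "\n ")
    (List.map_congr_left (fun k hk => by
      simp only [Function.comp_apply]
      rw [ce_conta_eq_count k]))

-- ===== VERDICT (by name: the statement is the Claim_ definition above) =====
theorem contar_elementos_spec : Claim_equal_contar_elementos :=
  fun lista _ => ce_main lista
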